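-- pv_equiv track=rewrite | github.com/dany-edx/rag-ti | utils/qcells_route_engine.py | removal_duplicates
-- ===== SOURCE A (Python) =====
-- def removal_duplicates(href_list):
--     grouped_data = {}
--     for key, value in href_list:
--         if key not in grouped_data:
--             grouped_data[key] = []
--         grouped_data[key].append(value)
--
--     filtered_data = []
--     for key, values in grouped_data.items():
--         max_value = max(values, key=len)
--         filtered_data.append([key, max_value])
--     return filtered_data
-- ===== SOURCE B (Python) =====
-- def removal_duplicates(href_list):
--     best = {}
--     for key, value in href_list:
--         cur = best.get(key)
--         if cur is None or len(value) > len(cur):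
--             best[key] = value
--     return [[k, v] for k, v in best.items()]
-- ===== Notes on version B (the rewrite author's own statement) =====
-- stated objective: alternative
-- what changed: Single pass keeping only the running longest value per key in a dict, instead of first accumulating every value per key into lists and then a second pass taking max(values, key=len).
import Mathlib
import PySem

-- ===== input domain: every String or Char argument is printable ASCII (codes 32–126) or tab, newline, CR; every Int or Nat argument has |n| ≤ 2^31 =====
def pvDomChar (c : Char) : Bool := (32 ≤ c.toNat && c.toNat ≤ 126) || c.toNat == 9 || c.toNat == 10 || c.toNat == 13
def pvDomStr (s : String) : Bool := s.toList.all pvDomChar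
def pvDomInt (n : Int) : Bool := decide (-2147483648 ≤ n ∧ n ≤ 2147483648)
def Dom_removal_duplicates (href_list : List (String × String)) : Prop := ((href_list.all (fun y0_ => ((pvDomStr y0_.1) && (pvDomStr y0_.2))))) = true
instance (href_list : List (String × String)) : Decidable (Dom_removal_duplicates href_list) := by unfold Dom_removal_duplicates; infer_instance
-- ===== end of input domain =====

-- B replaces A's group-everything-then-max two-phase scheme by a single pass that keeps
-- only the running longest value per key (alternative decomposition, same asymptotic cost).

-- ===== PORT A =====
-- loop body of A's grouping loop: setdefault-style 'if key not in d: d[key] = []' then append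
def pvGroupStep (d : PySem.Dict String (List String)) (p : String × String) : PySem.Dict String (List String) :=
  let d' := if d.contains p.1 then d else d.insert p.1 []
  d'.modify p.1 [] (fun l => l ++ [p.2])

def removal_duplicates (href_list : List (String × String)) : List (List String) :=
  let grouped := href_list.foldl pvGroupStep PySem.Dict.empty
  -- max(values, key=len): values is never empty here, so the .getD "" default is never used
  grouped.items.map (fun kv => [kv.1, (PySem.List.max? kv.2 PySem.Str.len).getD ""])

-- ===== PORT B =====
-- loop body of B: keep the running longest value per key (strict >, first of ties kept)
def pvBestStep (d : PySem.Dict String String) (p : String × String) : PySem.Dict String String :=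
  match d.get? p.1 with
  | none => d.insert p.1 p.2
  | some cur => if PySem.Str.len cur < PySem.Str.len p.2 then d.insert p.1 p.2 else d

def removal_duplicates_alt (href_list : List (String × String)) : List (List String) :=
  let best := href_list.foldl pvBestStep PySem.Dict.empty
  best.items.map (fun kv => [kv.1, kv.2])

-- ===== PRECONDITION & SPEC =====
def Spec_removal_duplicates (href_list : List (String × String)) (out : List (List String)) : Prop := out = removal_duplicates_alt href_list
instance (href_list : List (String × String)) (out : List (List String)) : Decidable (Spec_removal_duplicates href_list out) := by unfold Spec_removal_duplicates; infer_instance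

-- ===== CLAIM (what is proved, stated in full; the proofs are below) =====
def Claim_equal_removal_duplicates : Prop := ∀ (href_list : List (String × String)), Dom_removal_duplicates href_list → Spec_removal_duplicates href_list (removal_duplicates href_list)

-- ===== LEMMAS AND PROOFS =====

-- the value A extracts from a group
def pvMaxLen (vs : List String) : String := (PySem.List.max? vs PySem.Str.len).getD ""

theorem pvMaxLen_singleton (v : String) : pvMaxLen ([] ++ [v]) = v := by
  simp [pvMaxLen, PySem.List.max?]

theorem pvMaxLen_append (vs : List String) (v : String) (h : vs ≠ []) :
    pvMaxLen (vs ++ [v]) =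
      if PySem.Str.len (pvMaxLen vs) < PySem.Str.len v then v else pvMaxLen vs := by
  cases hm : PySem.List.max? vs PySem.Str.len with
  | none => exact absurd ((PySem.List.max?_eq_none_iff vs PySem.Str.len).mp hm) h
  | some m =>
    simp only [pvMaxLen, PySem.List.max?] at hm ⊢
    rw [List.foldl_append, hm]
    simp only [List.foldl_cons, List.foldl_nil, Option.getD_some]
    split <;> simp

-- the loop invariant relating A's grouping dict to B's best dict
def pvInv (dA : PySem.Dict String (List String)) (dB : PySem.Dict String String) : Prop :=
  dB.keys = dA.keys ∧ dA.keys.Nodup ∧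
  ∀ k ∈ dA.keys, dA.getD k [] ≠ [] ∧ dB.getD k "" = pvMaxLen (dA.getD k [])

theorem pvInv_step (dA : PySem.Dict String (List String)) (dB : PySem.Dict String String)
    (p : String × String) (h : pvInv dA dB) : pvInv (pvGroupStep dA p) (pvBestStep dB p) := by
  obtain ⟨hkeys, hnd, hval⟩ := h
  by_cases hk : p.1 ∈ dA.keys
  · -- key already present: A appends to the group, B compares lengths
    have hcA : dA.contains p.1 = true := (PySem.Dict.contains_iff_mem_keys dA p.1).mpr hk
    obtain ⟨hne, hbest⟩ := hval p.1 hk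
    have hkB : p.1 ∈ dB.keys := hkeys ▸ hk
    have hcB : dB.contains p.1 = true := (PySem.Dict.contains_iff_mem_keys dB p.1).mpr hkB
    have hgB : dB.get? p.1 = some (dB.getD p.1 "") := by
      cases hgb : dB.get? p.1 with
      | none => exact absurd ((PySem.Dict.get?_eq_none_iff_not_mem_keys dB p.1).mp hgb) (by simp [hkB])
      | some w => rw [PySem.Dict.getD_of_get?_eq_some dB "" hgb]
    have hAkeys : (pvGroupStep dA p).keys = dA.keys := by
      simp only [pvGroupStep, hcA, if_pos, PySem.Dict.modify]
      exact PySem.Dict.keys_insert_of_contains dA _ hcA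
    have hAget : ∀ k', (pvGroupStep dA p).getD k' [] =
        if k' = p.1 then dA.getD p.1 [] ++ [p.2] else dA.getD k' [] := by
      intro k'
      simp only [pvGroupStep, hcA, if_pos, PySem.Dict.modify]
      rw [PySem.Dict.getD_insert]
    have hstep : pvBestStep dB p =
        if PySem.Str.len (dB.getD p.1 "") < PySem.Str.len p.2 then dB.insert p.1 p.2 else dB := by
      simp only [pvBestStep, hgB]
    have hBkeys : (pvBestStep dB p).keys = dB.keys := by
      rw [hstep]; split
      · exact PySem.Dict.keys_insert_of_contains dB _ hcB
      · rfl
    have hBget : ∀ k', (pvBestStep dB p).getD k' "" =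
        if k' = p.1 then
          (if PySem.Str.len (dB.getD p.1 "") < PySem.Str.len p.2 then p.2 else dB.getD p.1 "")
        else dB.getD k' "" := by
      intro k'
      rw [hstep]; split
      · rw [PySem.Dict.getD_insert]
      · by_cases hkp : k' = p.1 <;> simp [hkp]
    refine ⟨hBkeys.trans (hkeys.trans hAkeys.symm), hAkeys ▸ hnd, ?_⟩
    intro k hkmem
    rw [hAkeys] at hkmem
    rw [hAget k, hBget k]
    by_cases hkp : k = p.1
    · subst hkp
      refine ⟨by simp, ?_⟩
      rw [if_pos rfl, if_pos rfl, pvMaxLen_append _ _ hne, hbest]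
    · rw [if_neg hkp, if_neg hkp]
      exact hval k hkmem
  · -- fresh key: both sides append it
    have hcA : dA.contains p.1 = false := by
      rw [PySem.Dict.contains_eq_decide_mem_keys]; simp [hk]
    have hkB : p.1 ∉ dB.keys := hkeys ▸ hk
    have hgB : dB.get? p.1 = none := (PySem.Dict.get?_eq_none_iff_not_mem_keys dB p.1).mpr hkB
    have hcB : dB.contains p.1 = false := by
      rw [PySem.Dict.contains_eq_decide_mem_keys]; simp [hkB]
    have hAkeys : (pvGroupStep dA p).keys = dA.keys ++ [p.1] := by
      have h1 : (dA.insert p.1 []).contains p.1 = true := PySem.Dict.contains_insert_self dA p.1 []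
      simp only [pvGroupStep, hcA, Bool.false_eq_true, if_false, PySem.Dict.modify]
      rw [PySem.Dict.keys_insert_of_contains _ _ h1, PySem.Dict.keys_insert_of_not_contains dA _ hcA]
    have hAget : ∀ k', (pvGroupStep dA p).getD k' [] =
        if k' = p.1 then [] ++ [p.2] else dA.getD k' [] := by
      intro k'
      simp only [pvGroupStep, hcA, Bool.false_eq_true, if_false, PySem.Dict.modify]
      rw [PySem.Dict.getD_insert]
      by_cases hkp : k' = p.1
      · rw [if_pos hkp, if_pos hkp, PySem.Dict.getD_insert, if_pos rfl]
      · rw [if_neg hkp, if_neg hkp, PySem.Dict.getD_insert, if_neg hkp]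
    have hBkeys : (pvBestStep dB p).keys = dB.keys ++ [p.1] := by
      simp only [pvBestStep, hgB]
      exact PySem.Dict.keys_insert_of_not_contains dB _ hcB
    have hBget : ∀ k', (pvBestStep dB p).getD k' "" =
        if k' = p.1 then p.2 else dB.getD k' "" := by
      intro k'
      simp only [pvBestStep, hgB]
      rw [PySem.Dict.getD_insert]
    have hndA' : (pvGroupStep dA p).keys.Nodup := by
      rw [hAkeys]
      exact List.Nodup.append hnd (List.nodup_singleton _)
        (by simpa [List.disjoint_singleton] using hk)
    refine ⟨by rw [hBkeys, hAkeys, hkeys], hndA', ?_⟩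
    intro k hkmem
    rw [hAget k, hBget k]
    by_cases hkp : k = p.1
    · subst hkp
      rw [if_pos rfl, if_pos rfl]
      exact ⟨by simp, (pvMaxLen_singleton p.2).symm ▸ rfl⟩
    · rw [if_neg hkp, if_neg hkp]
      rw [hAkeys] at hkmem
      exact hval k (by simpa [hkp] using hkmem)

theorem pvInv_foldl (l : List (String × String)) :
    ∀ (dA : PySem.Dict String (List String)) (dB : PySem.Dict String String), pvInv dA dB →
    pvInv (l.foldl pvGroupStep dA) (l.foldl pvBestStep dB) := by
  induction l with
  | nil => intro dA dB h; exact h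
  | cons p t ih => intro dA dB h; exact ih _ _ (pvInv_step dA dB p h)

-- ===== VERDICT (by name: the statement is the Claim_ definition above) =====
theorem removal_duplicates_spec : Claim_equal_removal_duplicates := by
  intro href_list _
  simp only [Spec_removal_duplicates, removal_duplicates, removal_duplicates_alt]
  have hinv : pvInv (href_list.foldl pvGroupStep PySem.Dict.empty)
      (href_list.foldl pvBestStep PySem.Dict.empty) := by
    apply pvInv_foldl
    exact ⟨by simp [PySem.Dict.keys_empty], PySem.Dict.nodup_keys_empty, by simp [PySem.Dict.keys_empty]⟩
  obtain ⟨hkeys, hnd, hval⟩ := hinv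
  have hndB : (href_list.foldl pvBestStep PySem.Dict.empty).keys.Nodup := hkeys ▸ hnd
  rw [PySem.Dict.items_eq_map_keys _ hnd ([] : List String),
      PySem.Dict.items_eq_map_keys _ hndB ("" : String), hkeys]
  simp only [List.map_map]
  apply List.map_congr_left
  intro k hkmem
  simp only [Function.comp_apply]
  rw [(hval k hkmem).2]
  rfl
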